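-- pv_equiv track=rewrite | github.com/pickleton89/agent-os-pocketflow | pocketflow_tools/generators/code_generators.py | _get_utility_guidance_comments
-- ===== SOURCE A (Python) =====
-- from typing import Any, Dict, List
--
-- def _get_utility_guidance_comments(utility: Dict[str, Any]) -> List[str]:
--     """Generate specific guidance comments based on utility type."""
--     name = utility.get("name", "").lower()
--     description = utility.get("description", "").lower()
--
--     # Detect utility patterns and provide specific guidance
--     if any(keyword in name or keyword in description for keyword in ["llm", "ai", "chat", "completion"]):
--         return [
--             "GUIDANCE: For LLM utilities, keep prompts simple and transparent.",
--             "- Pass prompts as clear parameters, don't construct them internally",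
--             "- Avoid complex reasoning chains or decision logic",
--             "- Let nodes handle prompt construction and result processing",
--         ]
--
--     if any(keyword in name or keyword in description for keyword in ["file", "read", "write", "load", "save"]):
--         return [
--             "GUIDANCE: For file utilities, focus on simple I/O operations.",
--             "- Handle basic file reading/writing/parsing",
--             "- Keep error handling simple (let exceptions bubble up)",
--             "- Avoid complex file processing logic",
--         ]
--
--     if any(keyword in name or keyword in description for keyword in ["api", "http", "request", "fetch", "client"]):
--         return [
--             "GUIDANCE: For API utilities, provide clean service interfaces.",
--             "- Focus on request/response handling",
--             "- Keep authentication and retry logic simple",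
--             "- Avoid business logic or complex response processing",
--         ]
--
--     if any(keyword in name or keyword in description for keyword in ["parse", "format", "convert", "transform"]):
--         return [
--             "GUIDANCE: For data utilities, focus on simple transformations.",
--             "- Handle straightforward data format conversions",
--             "- Avoid complex data validation or business rules",
--             "- Keep transformations stateless and predictable",
--         ]
--
--     # Generic guidance
--     return [
--         "GUIDANCE: Keep this utility simple and focused.",
--         "- Perform one clear operation",
--         "- Avoid hidden complexity or side effects",
--         "- Let nodes coordinate multiple utility calls",
--     ]
-- ===== SOURCE B (Python) =====
-- from typing import Any, Dict, List
--
-- # Flat keyword -> category map (categories 0..3, 4 = generic fallback).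
-- _KEYWORD_CATEGORY = {
--     "llm": 0, "ai": 0, "chat": 0, "completion": 0,
--     "file": 1, "read": 1, "write": 1, "load": 1, "save": 1,
--     "api": 2, "http": 2, "request": 2, "fetch": 2, "client": 2,
--     "parse": 3, "format": 3, "convert": 3, "transform": 3,
-- }
--
-- _GUIDANCE = [
--     [
--         "GUIDANCE: For LLM utilities, keep prompts simple and transparent.",
--         "- Pass prompts as clear parameters, don't construct them internally",
--         "- Avoid complex reasoning chains or decision logic",
--         "- Let nodes handle prompt construction and result processing",
--     ],
--     [
--         "GUIDANCE: For file utilities, focus on simple I/O operations.",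
--         "- Handle basic file reading/writing/parsing",
--         "- Keep error handling simple (let exceptions bubble up)",
--         "- Avoid complex file processing logic",
--     ],
--     [
--         "GUIDANCE: For API utilities, provide clean service interfaces.",
--         "- Focus on request/response handling",
--         "- Keep authentication and retry logic simple",
--         "- Avoid business logic or complex response processing",
--     ],
--     [
--         "GUIDANCE: For data utilities, focus on simple transformations.",
--         "- Handle straightforward data format conversions",
--         "- Avoid complex data validation or business rules",
--         "- Keep transformations stateless and predictable",
--     ],
--     [
--         "GUIDANCE: Keep this utility simple and focused.",
--         "- Perform one clear operation",
--         "- Avoid hidden complexity or side effects",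
--         "- Let nodes coordinate multiple utility calls",
--     ],
-- ]
--
-- def _get_utility_guidance_comments(utility: Dict[str, Any]) -> List[str]:
--     """Exhaustive flat keyword scan: the answer is the MINIMUM matched category
--     (groups are checked in priority order in A, so first-match = min index)."""
--     name = utility.get("name", "").lower()
--     description = utility.get("description", "").lower()
--     best = 4  # generic
--     for kw, cat in _KEYWORD_CATEGORY.items():
--         if kw in name or kw in description:
--             best = min(best, cat)
--     return _GUIDANCE[best]
-- ===== Notes on version B (the rewrite author's own statement) =====
-- stated objective: alternative
-- what changed: Replaced A's four ordered early-return keyword-group branches by one exhaustive pass over a flat keyword->category map that accumulates the minimum matched category index and indexes a guidance table once; correct because priority-ordered first group match equals the minimum matched category.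
import Mathlib
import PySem

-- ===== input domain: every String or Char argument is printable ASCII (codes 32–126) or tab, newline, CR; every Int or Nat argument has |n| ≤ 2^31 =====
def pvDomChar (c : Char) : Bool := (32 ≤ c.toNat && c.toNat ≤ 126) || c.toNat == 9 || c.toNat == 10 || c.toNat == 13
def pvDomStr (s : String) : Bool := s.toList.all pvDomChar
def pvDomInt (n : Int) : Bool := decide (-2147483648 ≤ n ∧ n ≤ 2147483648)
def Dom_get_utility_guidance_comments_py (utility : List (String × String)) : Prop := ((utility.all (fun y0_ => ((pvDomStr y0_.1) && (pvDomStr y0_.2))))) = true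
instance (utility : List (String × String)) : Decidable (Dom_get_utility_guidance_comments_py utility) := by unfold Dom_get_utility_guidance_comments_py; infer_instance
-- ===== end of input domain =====

-- B replaces A's four ordered early-return branches by one exhaustive pass over a flat
-- keyword->category map accumulating the minimum matched category (objective: alternative).

-- ===== PORT A =====
def get_utility_guidance_comments_py (utility : List (String × String)) : List String :=
  let name := PySem.Str.lower ((PySem.Dict.ofList utility).getD "name" "")
  let description := PySem.Str.lower ((PySem.Dict.ofList utility).getD "description" "")
  if (["llm", "ai", "chat", "completion"].any (fun k => PySem.Str.isIn k name || PySem.Str.isIn k description)) then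
    ["GUIDANCE: For LLM utilities, keep prompts simple and transparent.",
     "- Pass prompts as clear parameters, don't construct them internally",
     "- Avoid complex reasoning chains or decision logic",
     "- Let nodes handle prompt construction and result processing"]
  else if (["file", "read", "write", "load", "save"].any (fun k => PySem.Str.isIn k name || PySem.Str.isIn k description)) then
    ["GUIDANCE: For file utilities, focus on simple I/O operations.",
     "- Handle basic file reading/writing/parsing",
     "- Keep error handling simple (let exceptions bubble up)",
     "- Avoid complex file processing logic"]
  else if (["api", "http", "request", "fetch", "client"].any (fun k => PySem.Str.isIn k name || PySem.Str.isIn k description)) then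
    ["GUIDANCE: For API utilities, provide clean service interfaces.",
     "- Focus on request/response handling",
     "- Keep authentication and retry logic simple",
     "- Avoid business logic or complex response processing"]
  else if (["parse", "format", "convert", "transform"].any (fun k => PySem.Str.isIn k name || PySem.Str.isIn k description)) then
    ["GUIDANCE: For data utilities, focus on simple transformations.",
     "- Handle straightforward data format conversions",
     "- Avoid complex data validation or business rules",
     "- Keep transformations stateless and predictable"]
  else
    ["GUIDANCE: Keep this utility simple and focused.",
     "- Perform one clear operation",
     "- Avoid hidden complexity or side effects",
     "- Let nodes coordinate multiple utility calls"]

-- ===== PORT B =====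
-- flat keyword -> category map (Source B's _KEYWORD_CATEGORY, as an association list in order)
def pvKeywordCategory : List (String × Nat) :=
  [("llm", 0), ("ai", 0), ("chat", 0), ("completion", 0),
   ("file", 1), ("read", 1), ("write", 1), ("load", 1), ("save", 1),
   ("api", 2), ("http", 2), ("request", 2), ("fetch", 2), ("client", 2),
   ("parse", 3), ("format", 3), ("convert", 3), ("transform", 3)]

-- Source B's _GUIDANCE table (index 4 = generic)
def pvGuidance : List (List String) :=
  [["GUIDANCE: For LLM utilities, keep prompts simple and transparent.",
    "- Pass prompts as clear parameters, don't construct them internally",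
    "- Avoid complex reasoning chains or decision logic",
    "- Let nodes handle prompt construction and result processing"],
   ["GUIDANCE: For file utilities, focus on simple I/O operations.",
    "- Handle basic file reading/writing/parsing",
    "- Keep error handling simple (let exceptions bubble up)",
    "- Avoid complex file processing logic"],
   ["GUIDANCE: For API utilities, provide clean service interfaces.",
    "- Focus on request/response handling",
    "- Keep authentication and retry logic simple",
    "- Avoid business logic or complex response processing"],
   ["GUIDANCE: For data utilities, focus on simple transformations.",
    "- Handle straightforward data format conversions",
    "- Avoid complex data validation or business rules",
    "- Keep transformations stateless and predictable"],
   ["GUIDANCE: Keep this utility simple and focused.",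
    "- Perform one clear operation",
    "- Avoid hidden complexity or side effects",
    "- Let nodes coordinate multiple utility calls"]]

def get_utility_guidance_comments_py_alt (utility : List (String × String)) : List String :=
  let name := PySem.Str.lower ((PySem.Dict.ofList utility).getD "name" "")
  let description := PySem.Str.lower ((PySem.Dict.ofList utility).getD "description" "")
  let best := pvKeywordCategory.foldl
    (fun b p => if PySem.Str.isIn p.1 name || PySem.Str.isIn p.1 description then min b p.2 else b) 4
  -- _GUIDANCE[best]: best ≤ 4 always (fold only lowers it), so the index is in range; getD is exact here
  pvGuidance.getD best []

-- ===== PRECONDITION & SPEC =====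
def Spec_get_utility_guidance_comments_py (utility : List (String × String)) (out : List String) : Prop := out = get_utility_guidance_comments_py_alt utility
instance (utility : List (String × String)) (out : List String) : Decidable (Spec_get_utility_guidance_comments_py utility out) := by unfold Spec_get_utility_guidance_comments_py; infer_instance

-- ===== CLAIM =====
def Claim_equal_get_utility_guidance_comments_py : Prop := ∀ (utility : List (String × String)), Dom_get_utility_guidance_comments_py utility → Spec_get_utility_guidance_comments_py utility (get_utility_guidance_comments_py utility)

-- ===== LEMMAS AND PROOFS =====

-- folding B's min-accumulator over one keyword group of constant category c
theorem pv_fold_group (name description : String) (ks : List String) (c best : Nat) :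
    (ks.map (fun k => (k, c))).foldl
      (fun b p => if PySem.Str.isIn p.1 name || PySem.Str.isIn p.1 description then min b p.2 else b) best
      = if ks.any (fun k => PySem.Str.isIn k name || PySem.Str.isIn k description) then min best c else best := by
  induction ks generalizing best with
  | nil => rfl
  | cons k t ih =>
    simp only [List.map_cons, List.foldl_cons, List.any_cons]
    by_cases h : (PySem.Str.isIn k name || PySem.Str.isIn k description) = true
    · rw [if_pos h]
      simp only [h, Bool.true_or, if_true, ih]
      by_cases ht : (t.any fun k => PySem.Str.isIn k name || PySem.Str.isIn k description) = true
      · rw [if_pos ht, Nat.min_assoc, Nat.min_self]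
      · rw [if_neg ht]
    · rw [if_neg h]
      simp only [eq_false_of_ne_true h, Bool.false_or, ih]

-- first matching group in priority order = minimum matched category, on arbitrary lowered texts
theorem pv_core (name description : String) :
    (if (["llm", "ai", "chat", "completion"].any (fun k => PySem.Str.isIn k name || PySem.Str.isIn k description)) then
      ["GUIDANCE: For LLM utilities, keep prompts simple and transparent.",
       "- Pass prompts as clear parameters, don't construct them internally",
       "- Avoid complex reasoning chains or decision logic",
       "- Let nodes handle prompt construction and result processing"]
    else if (["file", "read", "write", "load", "save"].any (fun k => PySem.Str.isIn k name || PySem.Str.isIn k description)) then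
      ["GUIDANCE: For file utilities, focus on simple I/O operations.",
       "- Handle basic file reading/writing/parsing",
       "- Keep error handling simple (let exceptions bubble up)",
       "- Avoid complex file processing logic"]
    else if (["api", "http", "request", "fetch", "client"].any (fun k => PySem.Str.isIn k name || PySem.Str.isIn k description)) then
      ["GUIDANCE: For API utilities, provide clean service interfaces.",
       "- Focus on request/response handling",
       "- Keep authentication and retry logic simple",
       "- Avoid business logic or complex response processing"]
    else if (["parse", "format", "convert", "transform"].any (fun k => PySem.Str.isIn k name || PySem.Str.isIn k description)) then
      ["GUIDANCE: For data utilities, focus on simple transformations.",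
       "- Handle straightforward data format conversions",
       "- Avoid complex data validation or business rules",
       "- Keep transformations stateless and predictable"]
    else
      ["GUIDANCE: Keep this utility simple and focused.",
       "- Perform one clear operation",
       "- Avoid hidden complexity or side effects",
       "- Let nodes coordinate multiple utility calls"]) =
    pvGuidance.getD
      (pvKeywordCategory.foldl
        (fun b p => if PySem.Str.isIn p.1 name || PySem.Str.isIn p.1 description then min b p.2 else b) 4) [] := by
  have hflat : pvKeywordCategory =
      (["llm", "ai", "chat", "completion"].map (fun k => (k, 0)))
      ++ (["file", "read", "write", "load", "save"].map (fun k => (k, 1)))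
      ++ (["api", "http", "request", "fetch", "client"].map (fun k => (k, 2)))
      ++ (["parse", "format", "convert", "transform"].map (fun k => (k, 3))) := by rfl
  rw [hflat]
  simp only [List.foldl_append, pv_fold_group]
  cases h1 : (["llm", "ai", "chat", "completion"].any (fun k => PySem.Str.isIn k name || PySem.Str.isIn k description)) <;>
  cases h2 : (["file", "read", "write", "load", "save"].any (fun k => PySem.Str.isIn k name || PySem.Str.isIn k description)) <;>
  cases h3 : (["api", "http", "request", "fetch", "client"].any (fun k => PySem.Str.isIn k name || PySem.Str.isIn k description)) <;>
  cases h4 : (["parse", "format", "convert", "transform"].any (fun k => PySem.Str.isIn k name || PySem.Str.isIn k description)) <;>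
  simp [pvGuidance]

-- ===== VERDICT =====
theorem get_utility_guidance_comments_py_spec : Claim_equal_get_utility_guidance_comments_py := by
  intro utility _
  unfold Spec_get_utility_guidance_comments_py get_utility_guidance_comments_py get_utility_guidance_comments_py_alt
  exact pv_core _ _
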